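-- pv_equiv track=rewrite | github.com/Roout/aoc2021py | src/day4.py | check_col_winner
-- ===== SOURCE A (Python) =====
-- def check_col_winner(matrix, used):
--     size = len(matrix)
--     for col in range(0, size):
--         is_win = True
--         for row in range(0, size):
--             if matrix[row][col] not in used:
--                 is_win = False
--                 break
--         if is_win:
--             return col
--     return None
-- ===== SOURCE B (Python) =====
-- def check_col_winner(matrix, used):
--     size = len(matrix)
--     members = set(used)
--     counts = [0] * size
--     for row in matrix:
--         for col in range(size):
--             if row[col] in members:
--                 counts[col] += 1
--     for col, c in enumerate(counts):
--         if c == size: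
--             return col
--     return None
-- ===== Notes on version B (the rewrite author's own statement) =====
-- stated objective: alternative
-- what changed: Replaces A's per-column scan with early break and early return by a single row-major tally pass (one counter per column, membership tested against a set) followed by a scan of the tally for the first full column.
-- outside the precondition, e.g. on check_col_winner([[1], [2, 3]], {1, 2}): A returns 0, B raises IndexError
import Mathlib
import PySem

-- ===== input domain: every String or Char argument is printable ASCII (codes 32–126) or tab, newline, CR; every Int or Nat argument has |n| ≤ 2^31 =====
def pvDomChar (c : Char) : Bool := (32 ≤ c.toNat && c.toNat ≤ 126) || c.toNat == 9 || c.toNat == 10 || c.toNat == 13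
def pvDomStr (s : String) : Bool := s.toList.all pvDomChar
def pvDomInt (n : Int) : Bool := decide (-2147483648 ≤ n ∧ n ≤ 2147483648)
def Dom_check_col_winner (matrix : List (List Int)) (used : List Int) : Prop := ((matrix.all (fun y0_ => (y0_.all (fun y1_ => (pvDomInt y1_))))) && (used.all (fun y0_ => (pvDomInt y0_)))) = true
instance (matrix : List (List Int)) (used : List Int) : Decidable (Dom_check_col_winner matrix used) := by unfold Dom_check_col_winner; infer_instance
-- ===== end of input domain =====

-- B replaces A's per-column scan (early break / early return) by a row-major tally of
-- per-column hit counts followed by a scan for the first full column (alternative decomposition).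


-- ===== PORT A =====
-- inner 'for row in range(0, size)' loop with its break (false = the break fired, is_win = False)
def pvAInner (matrix : List (List Int)) (used : List Int) (col : Nat) : List Nat → Bool
  | [] => true
  | r :: rs => if ((matrix.getD r []).getD col 0) ∉ used then false else pvAInner matrix used col rs

-- outer 'for col in range(0, size)' loop with its early 'return col'
def pvAOuter (matrix : List (List Int)) (used : List Int) : List Nat → Option Int
  | [] => none
  | c :: cs => if pvAInner matrix used c (List.range matrix.length) then some (c : Int) else pvAOuter matrix used cs

def check_col_winner (matrix : List (List Int)) (used : List Int) : Option Int :=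
  pvAOuter matrix used (List.range matrix.length)

-- ===== PORT B =====
-- one row of the tally pass: 'for col in range(size): if row[col] in members: counts[col] += 1'
def pvBStep (members : List Int) (size : Nat) (counts : List Nat) (row : List Int) : List Nat :=
  (List.range size).foldl (fun cs col => if row.getD col 0 ∈ members then cs.set col (cs.getD col 0 + 1) else cs) counts

-- 'for col, c in enumerate(counts): if c == size: return col'
def pvBSelect (size : Nat) : Nat → List Nat → Option Int
  | _, [] => none
  | i, k :: rest => if k = size then some (i : Int) else pvBSelect size (i + 1) rest

def check_col_winner_alt (matrix : List (List Int)) (used : List Int) : Option Int :=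
  let size := matrix.length
  let members := PySem.Set.ofList used
  pvBSelect size 0 (matrix.foldl (pvBStep members size) (List.replicate size 0))

-- ===== PRECONDITION & SPEC =====
-- Pre_ excludes ragged matrices (a row shorter than len(matrix)): there the Python A raises
-- IndexError unless an early break/return happens to skip the short row, and B raises IndexError.
def Pre_check_col_winner (matrix : List (List Int)) (used : List Int) : Prop :=
  ∀ row ∈ matrix, matrix.length ≤ row.length
instance (matrix : List (List Int)) (used : List Int) : Decidable (Pre_check_col_winner matrix used) := by unfold Pre_check_col_winner; infer_instance

def pvWitness_check_col_winner : List (List Int) × List Int := ([[1, 2], [3, 4]], [1, 3])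

def Spec_check_col_winner (matrix : List (List Int)) (used : List Int) (out : Option Int) : Prop := out = check_col_winner_alt matrix used
instance (matrix : List (List Int)) (used : List Int) (out : Option Int) : Decidable (Spec_check_col_winner matrix used out) := by unfold Spec_check_col_winner; infer_instance

-- ===== CLAIM (what is proved, stated in full; the proofs are below) =====
def Claim_equal_check_col_winner : Prop := ∀ (matrix : List (List Int)) (used : List Int), Dom_check_col_winner matrix used → Pre_check_col_winner matrix used → Spec_check_col_winner matrix used (check_col_winner matrix used)

-- ===== LEMMAS AND PROOFS =====

-- the tally fold preserves the length of counts
theorem pvFoldl_set_length (members : List Int) (row : List Int) :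
    ∀ (l : List Nat) (counts : List Nat),
      (l.foldl (fun cs col => if row.getD col 0 ∈ members then cs.set col (cs.getD col 0 + 1) else cs) counts).length = counts.length := by
  intro l
  induction l with
  | nil => intro counts; rfl
  | cons c cs ih =>
      intro counts
      simp only [List.foldl_cons]
      rw [ih]
      split <;> simp

theorem pvBStep_length (members : List Int) (size : Nat) (counts : List Nat) (row : List Int) :
    (pvBStep members size counts row).length = counts.length := by
  unfold pvBStep; exact pvFoldl_set_length members row _ counts

-- one row of the tally adds the 0/1 indicator at every in-range column
theorem pvBStep_getD (members : List Int) (row : List Int) :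
    ∀ (n : Nat) (counts : List Nat) (c : Nat), c < counts.length →
      (pvBStep members n counts row).getD c 0 =
        counts.getD c 0 + (if c < n ∧ row.getD c 0 ∈ members then 1 else 0) := by
  intro n
  induction n with
  | zero => intro counts c hc; simp [pvBStep]
  | succ m ih =>
      intro counts c hc
      unfold pvBStep at *
      rw [List.range_succ, List.foldl_append, List.foldl_cons, List.foldl_nil]
      have hlen : ((List.range m).foldl (fun cs col => if row.getD col 0 ∈ members then cs.set col (cs.getD col 0 + 1) else cs) counts).length = counts.length :=
        pvFoldl_set_length members row _ counts
      by_cases hp : row.getD m 0 ∈ members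
      · simp only [hp, if_true]
        by_cases hcm : c = m
        · subst hcm
          have hc' : c < ((List.range c).foldl (fun cs col => if row.getD col 0 ∈ members then cs.set col (cs.getD col 0 + 1) else cs) counts).length := by
            rw [hlen]; exact hc
          rw [List.getD_eq_getElem?_getD, List.getElem?_set_self (by simpa using hc')]
          simp only [Option.getD_some]
          rw [ih counts c hc]
          have h1 : ¬ (c < c ∧ row.getD c 0 ∈ members) := by simp [Nat.lt_irrefl]
          have h2 : (c < c + 1 ∧ row.getD c 0 ∈ members) := ⟨Nat.lt_succ_self c, hp⟩
          rw [if_neg h1, if_pos h2]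
        · rw [List.getD_eq_getElem?_getD, List.getElem?_set_ne (by omega), ← List.getD_eq_getElem?_getD, ih counts c hc]
          have hiff : (c < m + 1 ∧ row.getD c 0 ∈ members) ↔ (c < m ∧ row.getD c 0 ∈ members) := by
            constructor <;> (rintro ⟨h1, h2⟩; exact ⟨by omega, h2⟩)
          simp only [hiff]
      · simp only [hp, if_false]
        rw [ih counts c hc]
        have hiff : (c < m + 1 ∧ row.getD c 0 ∈ members) ↔ (c < m ∧ row.getD c 0 ∈ members) := by
          by_cases hcm : c = m
          · subst hcm
            constructor
            · rintro ⟨h1, h2⟩; exact absurd h2 hp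
            · rintro ⟨h1, h2⟩; exact absurd h2 hp
          · constructor <;> (rintro ⟨h1, h2⟩; exact ⟨by omega, h2⟩)
        simp only [hiff]

-- the whole tally pass: final count at column c is the number of rows hitting column c
theorem pvTally_getD (members : List Int) (size : Nat) (c : Nat) (hcs : c < size) :
    ∀ (rows : List (List Int)) (counts : List Nat), c < counts.length →
      (rows.foldl (pvBStep members size) counts).getD c 0 =
        counts.getD c 0 + rows.countP (fun row => decide (row.getD c 0 ∈ members)) := by
  intro rows
  induction rows with
  | nil => intro counts hc; simp
  | cons r rs ih =>
      intro counts hc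
      simp only [List.foldl_cons, List.countP_cons]
      rw [ih _ (by rw [pvBStep_length]; exact hc), pvBStep_getD members r size counts c hc]
      by_cases hp : r.getD c 0 ∈ members <;> simp [hp, hcs] <;> omega

-- the whole tally pass preserves length
theorem pvTally_length (members : List Int) (size : Nat) :
    ∀ (rows : List (List Int)) (counts : List Nat),
      (rows.foldl (pvBStep members size) counts).length = counts.length := by
  intro rows
  induction rows with
  | nil => intro counts; rfl
  | cons r rs ih => intro counts; simp only [List.foldl_cons]; rw [ih, pvBStep_length]

-- A's inner loop is an 'all' over the row indices
theorem pvAInner_eq_all (matrix : List (List Int)) (used : List Int) (col : Nat) :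
    ∀ rs, pvAInner matrix used col rs = rs.all (fun r => decide ((matrix.getD r []).getD col 0 ∈ used)) := by
  intro rs
  induction rs with
  | nil => rfl
  | cons r rs ih =>
      simp only [pvAInner, List.all_cons]
      by_cases h : (matrix.getD r []).getD col 0 ∈ used <;> simp [h, ih]

-- B's selection scan agrees with A's outer loop when the counters characterise winning columns
theorem pvSelect_eq_outer (matrix : List (List Int)) (used : List Int) (size : Nat) :
    ∀ (ks : List Nat) (i : Nat),
      (∀ j, j < ks.length → (ks.getD j 0 = size ↔ pvAInner matrix used (i + j) (List.range matrix.length) = true)) →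
      pvBSelect size i ks = pvAOuter matrix used (List.range' i ks.length) := by
  intro ks
  induction ks with
  | nil => intro i _; rfl
  | cons k rest ih =>
      intro i h
      rw [List.length_cons, List.range'_succ]
      simp only [pvBSelect, pvAOuter]
      have h0 := h 0 (by simp)
      simp only [List.getD_cons_zero, Nat.add_zero] at h0
      by_cases hk : k = size
      · simp [hk, h0.mp hk]
      · have hA : ¬ (pvAInner matrix used i (List.range matrix.length) = true) := fun hc => hk (h0.mpr hc)
        simp only [hk, if_false, Bool.not_eq_true] at *
        rw [hA]
        simp only [Bool.false_eq_true, if_false]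
        apply ih
        intro j hj
        have := h (j + 1) (by simpa using Nat.succ_lt_succ hj)
        simpa [Nat.add_assoc, Nat.add_comm 1 j, Nat.add_left_comm] using this

-- winning column characterisation: full count ↔ every row hits, for c < size, under Pre_
theorem pvWin_iff (matrix : List (List Int)) (used : List Int) (c : Nat) (hcs : c < matrix.length) :
    (matrix.countP (fun row => decide (row.getD c 0 ∈ used)) = matrix.length) ↔
      pvAInner matrix used c (List.range matrix.length) = true := by
  rw [pvAInner_eq_all, List.countP_eq_length, List.all_eq_true]
  constructor
  · intro h r hr
    rw [List.mem_range] at hr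
    have := h (matrix.getD r []) (by rw [List.getD_eq_getElem _ _ hr]; exact List.getElem_mem hr)
    simpa using this
  · intro h row hrow
    obtain ⟨r, hr, hval⟩ := List.mem_iff_getElem.mp hrow
    have := h r (List.mem_range.mpr hr)
    rw [List.getD_eq_getElem _ _ hr, hval] at this
    simpa using this

-- ===== VERDICT (by name: the statement is the Claim_ definition above) =====
theorem check_col_winner_spec : Claim_equal_check_col_winner := by
  intro matrix used _ _
  unfold Spec_check_col_winner check_col_winner check_col_winner_alt
  set size := matrix.length with hsize
  set members := PySem.Set.ofList used with hmem
  set ks := matrix.foldl (pvBStep members size) (List.replicate size 0) with hks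
  have hklen : ks.length = size := by
    rw [hks, pvTally_length, List.length_replicate]
  rw [List.range_eq_range']
  rw [show List.range' 0 size = List.range' 0 ks.length by rw [hklen]]
  symm
  apply pvSelect_eq_outer
  intro j hj
  rw [hklen] at hj
  have hkd : ks.getD j 0 = matrix.countP (fun row => decide (row.getD j 0 ∈ members)) := by
    rw [hks, pvTally_getD members size j hj _ _ (by rw [List.length_replicate]; exact hj)]
    simp
  have hcongr : matrix.countP (fun row => decide (row.getD j 0 ∈ members)) =
      matrix.countP (fun row => decide (row.getD j 0 ∈ used)) := by
    apply List.countP_congr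
    intro row _
    simp [hmem, PySem.Set.mem_ofList]
  rw [hkd, hcongr, Nat.zero_add]
  exact pvWin_iff matrix used j hj
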